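-- pv_equiv track=rewrite | github.com/forealasting/MPDQN-Scalable_OneM2M_RL_for_INTEL | request/generate_workload.py | generate_data_rate_pattern
-- ===== SOURCE A (Python) =====
-- def generate_data_rate_pattern(total_time):
--     data_rate_pattern = []
--     timestamp = 0
--     data_rate = 20
--     max_data_rate = 120
--     min_data_rate = 20
--     delta_rate = 20
--     increasing = True
--
--     while timestamp < total_time:
--         for _ in range(240):
--             data_rate_pattern.append(data_rate)
--         if increasing:
--             if data_rate < max_data_rate:
--                 data_rate += delta_rate
--                 if data_rate==max_data_rate:
--                     increasing = False
--             else: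
--                 increasing = False
--         else:
--             if data_rate > min_data_rate:
--                 data_rate -= delta_rate
--                 if data_rate==min_data_rate:
--                     increasing = True
--             else:
--                 increasing = True
--         timestamp += 240
--
--     return data_rate_pattern[:total_time]
-- ===== SOURCE B (Python) =====
-- T = [20, 40, 60, 80, 100, 120, 100, 80, 60, 40]
--
-- def generate_data_rate_pattern(total_time):
--     return [T[(t // 240) % 10] for t in range(total_time)]
-- ===== Notes on version B (the rewrite author's own statement) =====
-- stated objective: simpler
-- what changed: Replaces the increasing/decreasing state machine that appends 240-element blocks and slices, by a closed-form modular lookup into the fixed 10-entry triangular-wave period table, one entry per output index.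
import Mathlib
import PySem

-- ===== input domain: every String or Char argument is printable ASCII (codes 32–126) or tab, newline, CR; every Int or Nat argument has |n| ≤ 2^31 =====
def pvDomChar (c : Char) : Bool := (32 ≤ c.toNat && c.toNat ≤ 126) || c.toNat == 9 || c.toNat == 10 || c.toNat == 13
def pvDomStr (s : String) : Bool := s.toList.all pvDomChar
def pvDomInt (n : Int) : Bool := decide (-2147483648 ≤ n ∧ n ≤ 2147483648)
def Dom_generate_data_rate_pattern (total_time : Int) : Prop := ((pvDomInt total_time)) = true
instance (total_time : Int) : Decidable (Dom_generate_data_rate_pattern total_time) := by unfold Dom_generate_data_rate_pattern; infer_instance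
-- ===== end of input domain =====

-- B replaces A's increasing/decreasing state machine (appending 240-element blocks, then
-- slicing) by a per-index lookup into the fixed 10-entry triangular-wave period table: simpler.

-- ===== PORT A =====
-- A's while loop; state = (accumulated pattern, timestamp, data_rate, increasing)
def pvLoopA (total_time : Int) (acc : List Int) (timestamp : Int) (data_rate : Int)
    (increasing : Bool) : List Int :=
  if _h : timestamp < total_time then
    -- for _ in range(240): data_rate_pattern.append(data_rate)
    let acc2 := (PySem.List.pyRange 0 240 1).foldl (fun a _ => a ++ [data_rate]) acc
    if increasing then
      if data_rate < 120 then
        let r := data_rate + 20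
        pvLoopA total_time acc2 (timestamp + 240) r (if r = 120 then false else increasing)
      else
        pvLoopA total_time acc2 (timestamp + 240) data_rate false
    else
      if data_rate > 20 then
        let r := data_rate - 20
        pvLoopA total_time acc2 (timestamp + 240) r (if r = 20 then true else increasing)
      else
        pvLoopA total_time acc2 (timestamp + 240) data_rate true
  else acc
termination_by (total_time - timestamp).toNat
decreasing_by all_goals omega

def generate_data_rate_pattern (total_time : Int) : List Int :=
  PySem.List.slice (pvLoopA total_time [] 0 20 true) none (some total_time)

-- ===== PORT B =====
def pvT : List Int := [20, 40, 60, 80, 100, 120, 100, 80, 60, 40]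

-- [T[(t // 240) % 10] for t in range(total_time)]; the index is mod 10 of a nonnegative
-- number, hence always in range of the 10-element table, so pyGetD's default is never used.
def generate_data_rate_pattern_alt (total_time : Int) : List Int :=
  (PySem.List.pyRange 0 total_time 1).map
    (fun t => PySem.List.pyGetD pvT (PySem.Int.mod (PySem.Int.floordiv t 240) 10) 0)

-- ===== PRECONDITION & SPEC =====
def Spec_generate_data_rate_pattern (total_time : Int) (out : List Int) : Prop := out = generate_data_rate_pattern_alt total_time
instance (total_time : Int) (out : List Int) : Decidable (Spec_generate_data_rate_pattern total_time out) := by unfold Spec_generate_data_rate_pattern; infer_instance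

-- ===== CLAIM (what is proved, stated in full; the proofs are below) =====
def Claim_equal_generate_data_rate_pattern : Prop := ∀ (total_time : Int), Dom_generate_data_rate_pattern total_time → Spec_generate_data_rate_pattern total_time (generate_data_rate_pattern total_time)

-- ===== LEMMAS AND PROOFS =====

-- the triangular wave as a function of the output index, starting at phase p
def pvPat (p : Nat) (n : Nat) : List Int :=
  (List.range n).map (fun t => pvT.getD ((p + t / 240) % 10) 0)

-- number of iterations A's while loop performs from timestamp ts
def pvIters (total ts : Int) : Nat := ((total - ts).toNat + 239) / 240

lemma pvBlock (acc : List Int) (r : Int) :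
    (PySem.List.pyRange 0 240 1).foldl (fun a _ => a ++ [r]) acc = acc ++ List.replicate 240 r := by
  simp only [PySem.List.foldl_append_singleton_eq_map]
  simp [List.map_const', PySem.List.length_pyRange_one]

lemma pvPat_split (p m : Nat) (hp : p < 10) :
    pvPat p (240 * (m + 1)) = List.replicate 240 (pvT.getD p 0) ++ pvPat ((p + 1) % 10) (240 * m) := by
  unfold pvPat
  rw [show 240 * (m + 1) = 240 + 240 * m from by ring, List.range_add, List.map_append]
  congr 1
  · rw [List.map_congr_left (g := fun _ => pvT.getD p 0) (fun t ht => by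
      simp only [List.mem_range] at ht
      congr 1
      omega)]
    simp [List.map_const']
  · rw [List.map_map]
    apply List.map_congr_left
    intro t ht
    simp only [Function.comp]
    congr 1
    omega

lemma pvIters_succ (total ts : Int) (h : ts < total) :
    pvIters total ts = pvIters total (ts + 240) + 1 := by
  unfold pvIters; omega

lemma pvLoopA_eq (n : Nat) : ∀ (total ts : Int) (p : Nat) (acc : List Int),
    p < 10 → pvIters total ts ≤ n →
    pvLoopA total acc ts (pvT.getD p 0) (decide (p < 5)) = acc ++ pvPat p (240 * pvIters total ts) := by
  induction n with
  | zero =>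
    intro total ts p acc hp hn
    rw [pvLoopA, dif_neg (by unfold pvIters at hn; omega)]
    have h0 : pvIters total ts = 0 := by omega
    rw [h0]; simp [pvPat]
  | succ n ih =>
    intro total ts p acc hp hn
    by_cases h : ts < total
    · rw [pvLoopA, dif_pos h]
      simp only [pvBlock]
      rw [pvIters_succ total ts h, pvPat_split p _ hp]
      have hn' : pvIters total (ts + 240) ≤ n := by
        have := pvIters_succ total ts h; omega
      rw [← List.append_assoc]
      interval_cases p
      · exact ih total (ts + 240) 1 _ (by omega) hn'
      · exact ih total (ts + 240) 2 _ (by omega) hn'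
      · exact ih total (ts + 240) 3 _ (by omega) hn'
      · exact ih total (ts + 240) 4 _ (by omega) hn'
      · exact ih total (ts + 240) 5 _ (by omega) hn'
      · exact ih total (ts + 240) 6 _ (by omega) hn'
      · exact ih total (ts + 240) 7 _ (by omega) hn'
      · exact ih total (ts + 240) 8 _ (by omega) hn'
      · exact ih total (ts + 240) 9 _ (by omega) hn'
      · exact ih total (ts + 240) 0 _ (by omega) hn'
    · rw [pvLoopA, dif_neg h]
      have h0 : pvIters total ts = 0 := by unfold pvIters; omega
      rw [h0]; simp [pvPat]

lemma pvAlt_eq (total : Int) :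
    generate_data_rate_pattern_alt total = pvPat 0 total.toNat := by
  unfold generate_data_rate_pattern_alt pvPat
  rw [PySem.List.pyRange_one, List.map_map]
  rw [show (total - 0).toNat = total.toNat from by omega]
  apply List.map_congr_left
  intro k hk
  simp only [Function.comp, zero_add]
  rw [PySem.Int.floordiv_eq_ediv_of_pos (by norm_num), PySem.Int.mod_eq_emod_of_pos (by norm_num)]
  have h1 : ((k : Int) / 240) % 10 = (((k / 240) % 10 : Nat) : Int) := by omega
  rw [h1, PySem.List.pyGetD_natCast]

-- ===== VERDICT (by name: the statement is the Claim_ definition above) =====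
theorem generate_data_rate_pattern_spec : Claim_equal_generate_data_rate_pattern := by
  intro total _hdom
  unfold Spec_generate_data_rate_pattern generate_data_rate_pattern
  have hA : pvLoopA total [] 0 20 true = [] ++ pvPat 0 (240 * pvIters total 0) :=
    pvLoopA_eq (pvIters total 0) total 0 0 [] (by norm_num) (le_refl _)
  rw [hA, List.nil_append, pvAlt_eq]
  by_cases h0 : 0 ≤ total
  · rw [PySem.List.slice_to _ h0]
    unfold pvPat
    rw [← List.map_take, List.take_range]
    congr 2
    unfold pvIters
    omega
  · have hL : pvIters total 0 = 0 := by unfold pvIters; omega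
    have ht : total.toNat = 0 := by omega
    rw [hL, ht]
    simp [pvPat, PySem.List.slice, PySem.List.clampIdx]
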